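-- pv_equiv track=rewrite | github.com/yuus95/algorithm_study | Yushin/2021데브매칭/행렬 테두리 회전하기/2.py | solution
-- ===== SOURCE A (Python) =====
-- def solution(rows, columns, queries):
--     answer = []
--     box=[]
--     box = [[0]* columns for _ in range(rows)]
--     num = 0
--     for i in range(rows):
--         for j in range(columns):
--             num+=1
--             box[i][j] = num
--     # for r in range(rows):
--     #     box.append([a for a in range(r * columns + 1, (r + 1) * columns + 1)])
--
--
--     for query in queries:
--         x1 = query[0] -1
--         y1 = query[1] -1
--         x2 = query[2] -1
--         y2 = query[3] -1
--         minNum = 2147000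
--
--
--         # 현재 바뀌기전 값
--         # 이전값
--         lastValue = box[x1+1][y1]
--         for k in range(y1,y2+1):
--             if lastValue < minNum :
--                 minNum = lastValue
--             tmp = box[x1][k]
--             box[x1][k] = lastValue
--             lastValue = tmp
--
--
--         for k in range(x1+1,x2+1):
--             if lastValue < minNum :
--                 minNum = lastValue
--             tmp = box[k][y2]
--             box[k][y2] = lastValue
--             lastValue = tmp
--
--         for k in range(y2-1,y1-1,-1):
--             if lastValue < minNum :
--                 minNum = lastValue
--             tmp = box[x2][k]
--             box[x2][k] = lastValue
--             lastValue = tmp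
--
--
--         for k in range(x2-1,x1,-1):
--             if lastValue < minNum :
--                 minNum = lastValue
--             tmp = box[k][y1]
--             box[k][y1] = lastValue
--             lastValue=  tmp
--
--
--         answer.append(minNum)
--     return answer
-- ===== SOURCE B (Python) =====
-- INF = 2147000
--
-- def solution(rows, columns, queries):
--     box = [[r * columns + c + 1 for c in range(columns)] for r in range(rows)]
--     answer = []
--     for q in queries:
--         x1, y1, x2, y2 = q[0] - 1, q[1] - 1, q[2] - 1, q[3] - 1
--         coords = ([(x1, c) for c in range(y1, y2 + 1)]
--                   + [(r, y2) for r in range(x1 + 1, x2 + 1)]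
--                   + [(x2, c) for c in range(y2 - 1, y1 - 1, -1)]
--                   + [(r, y1) for r in range(x2 - 1, x1, -1)])
--         vals = [box[r][c] for r, c in coords]
--         answer.append(min([INF] + vals))
--         for (r, c), v in zip(coords, vals[-1:] + vals[:-1]):
--             box[r][c] = v
--     return answer
-- ===== Notes on version B (the rewrite author's own statement) =====
-- stated objective: alternative
-- what changed: A rotates each border in place with four sequential shift loops threading a lastValue/tmp carry and a running minimum; B builds the clockwise border coordinate list once, gathers the values, takes min([INF]+vals) directly, and scatters the one-step-rotated value list back.
-- outside the precondition, e.g. on solution(3, 5, [[2, 3, 1, 4]]): A returns [8], B returns [3]; on solution(2, 3, [[-1, -2, -1, -2]]): A returns [4], B returns [1]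
import Mathlib
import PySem

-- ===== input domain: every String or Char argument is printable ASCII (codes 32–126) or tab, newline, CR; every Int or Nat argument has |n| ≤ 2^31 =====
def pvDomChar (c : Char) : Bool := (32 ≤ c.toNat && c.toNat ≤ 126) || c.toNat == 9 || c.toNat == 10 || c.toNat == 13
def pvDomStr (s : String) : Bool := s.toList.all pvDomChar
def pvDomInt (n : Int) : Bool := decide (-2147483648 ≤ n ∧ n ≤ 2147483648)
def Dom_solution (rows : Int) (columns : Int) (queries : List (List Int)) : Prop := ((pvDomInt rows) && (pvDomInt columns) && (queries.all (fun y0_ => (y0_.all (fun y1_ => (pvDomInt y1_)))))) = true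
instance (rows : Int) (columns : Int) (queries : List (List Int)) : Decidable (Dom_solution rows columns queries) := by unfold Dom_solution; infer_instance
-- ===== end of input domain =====

-- B is an alternative decomposition of the same border rotation: gather the clockwise border
-- coordinates once, take the min of the gathered values directly (with A's 2147000 initial bound),
-- and scatter the one-step-rotated value list back.

-- shared 2D-cell helpers (box[r][c] read / write, Python index semantics)
def getCell (box : List (List Int)) (r c : Int) : Int :=
  PySem.List.pyGetD (PySem.List.pyGetD box r []) c 0

def setCell (box : List (List Int)) (r c : Int) (v : Int) : List (List Int) :=
  PySem.List.pySetD box r (PySem.List.pySetD (PySem.List.pyGetD box r []) c v)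

-- ===== PORT A =====
-- body of each of A's four shift loops: update minNum from lastValue, swap lastValue through box[r][c]
def stepA (t : List (List Int) × Int × Int) (r c : Int) : List (List Int) × Int × Int :=
  let minNum := if t.2.1 < t.2.2 then t.2.1 else t.2.2
  let tmp := getCell t.1 r c
  (setCell t.1 r c t.2.1, tmp, minNum)

-- one iteration of A's `for query in queries` loop
def queryStepA (s : List (List Int) × List Int) (query : List Int) : List (List Int) × List Int :=
  let x1 := PySem.List.pyGetD query 0 0 - 1
  let y1 := PySem.List.pyGetD query 1 0 - 1
  let x2 := PySem.List.pyGetD query 2 0 - 1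
  let y2 := PySem.List.pyGetD query 3 0 - 1
  let lastValue := getCell s.1 (x1 + 1) y1
  let t1 := (PySem.List.pyRange y1 (y2 + 1) 1).foldl (fun t k => stepA t x1 k) (s.1, lastValue, 2147000)
  let t2 := (PySem.List.pyRange (x1 + 1) (x2 + 1) 1).foldl (fun t k => stepA t k y2) t1
  let t3 := (PySem.List.pyRange (y2 - 1) (y1 - 1) (-1)).foldl (fun t k => stepA t x2 k) t2
  let t4 := (PySem.List.pyRange (x2 - 1) x1 (-1)).foldl (fun t k => stepA t k y1) t3
  (t4.1, s.2 ++ [t4.2.2])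

def solution (rows : Int) (columns : Int) (queries : List (List Int)) : List Int :=
  let box0 : List (List Int) :=
    (PySem.List.pyRange 0 rows 1).map (fun _ => (PySem.List.pyRange 0 columns 1).map (fun _ => (0 : Int)))
  let numbered :=
    ((PySem.List.pyRange 0 rows 1).foldl (fun (s : List (List Int) × Int) i =>
      (PySem.List.pyRange 0 columns 1).foldl (fun (t : List (List Int) × Int) j =>
        (setCell t.1 i j (t.2 + 1), t.2 + 1)) s) (box0, 0)).1
  (queries.foldl queryStepA (numbered, ([] : List Int))).2

-- ===== PORT B =====
def borderCoords (x1 y1 x2 y2 : Int) : List (Int × Int) :=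
  (PySem.List.pyRange y1 (y2 + 1) 1).map (fun c => (x1, c))
  ++ (PySem.List.pyRange (x1 + 1) (x2 + 1) 1).map (fun r => (r, y2))
  ++ (PySem.List.pyRange (y2 - 1) (y1 - 1) (-1)).map (fun c => (x2, c))
  ++ (PySem.List.pyRange (x2 - 1) x1 (-1)).map (fun r => (r, y1))

def writeBack (box : List (List Int)) (ps : List ((Int × Int) × Int)) : List (List Int) :=
  ps.foldl (fun b pv => setCell b pv.1.1 pv.1.2 pv.2) box

-- one iteration of B's `for q in queries` loop
def queryStepB (s : List (List Int) × List Int) (q : List Int) : List (List Int) × List Int :=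
  let x1 := PySem.List.pyGetD q 0 0 - 1
  let y1 := PySem.List.pyGetD q 1 0 - 1
  let x2 := PySem.List.pyGetD q 2 0 - 1
  let y2 := PySem.List.pyGetD q 3 0 - 1
  let coords := borderCoords x1 y1 x2 y2
  let vals := coords.map (fun p => getCell s.1 p.1 p.2)
  let mn := (PySem.List.min? ((2147000 : Int) :: vals) (fun y => y)).getD 0
  let rotated := PySem.List.slice vals (some (-1)) none ++ PySem.List.slice vals none (some (-1))
  (writeBack s.1 (coords.zip rotated), s.2 ++ [mn])

def solution_alt (rows : Int) (columns : Int) (queries : List (List Int)) : List Int :=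
  let box0 : List (List Int) :=
    (PySem.List.pyRange 0 rows 1).map (fun r => (PySem.List.pyRange 0 columns 1).map (fun c => r * columns + c + 1))
  (queries.foldl queryStepB (box0, ([] : List Int))).2

-- ===== PRECONDITION & SPEC =====
-- Pre_ excludes malformed queries (fewer than 4 entries, coordinates outside [1,rows]×[1,columns], or
-- x1 ≥ x2 / y1 ≥ y2), on which Python A either raises IndexError or returns an accidental value via
-- negative-index wraparound and empty/inverted border walks.
def preQ (rows columns : Int) (q : List Int) : Bool :=
  match q with
  | a :: b :: c :: d :: _ => decide (1 ≤ a ∧ a < c ∧ c ≤ rows ∧ 1 ≤ b ∧ b < d ∧ d ≤ columns)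
  | _ => false

def Pre_solution (rows : Int) (columns : Int) (queries : List (List Int)) : Prop :=
  queries.all (preQ rows columns) = true

instance (rows : Int) (columns : Int) (queries : List (List Int)) : Decidable (Pre_solution rows columns queries) := by
  unfold Pre_solution; infer_instance

def pvWitness_solution : Int × Int × List (List Int) := (3, 3, [[1, 1, 3, 3]])

def Spec_solution (rows : Int) (columns : Int) (queries : List (List Int)) (out : List Int) : Prop := out = solution_alt rows columns queries
instance (rows : Int) (columns : Int) (queries : List (List Int)) (out : List Int) : Decidable (Spec_solution rows columns queries out) := by unfold Spec_solution; infer_instance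

-- ===== CLAIM (what is proved, stated in full; the proofs are below) =====
def Claim_equal_solution : Prop := ∀ (rows : Int) (columns : Int) (queries : List (List Int)), Dom_solution rows columns queries → Pre_solution rows columns queries → Spec_solution rows columns queries (solution rows columns queries)

-- ===== LEMMAS AND PROOFS =====

lemma getCell_setCell_ne (box : List (List Int)) {r c r' c' : Int} (v : Int)
    (hr : 0 ≤ r) (hc : 0 ≤ c) (hr' : 0 ≤ r') (hc' : 0 ≤ c')
    (hne : (r, c) ≠ (r', c')) :
    getCell (setCell box r c v) r' c' = getCell box r' c' := by
  have hcases : r ≠ r' ∨ (r = r' ∧ c ≠ c') := by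
    by_cases h : r = r'
    · exact Or.inr ⟨h, fun hcc => hne (by rw [h, hcc])⟩
    · exact Or.inl h
  unfold getCell setCell
  rw [PySem.List.pySetD_of_nonneg _ _ hr,
      PySem.List.pyGetD_of_nonneg _ _ hr', PySem.List.pyGetD_of_nonneg _ _ hr']
  rcases hcases with h | ⟨h, hcc⟩
  · have hnn : ¬ (r.toNat = r'.toNat) := by omega
    rw [List.getD_eq_getElem?_getD, List.getD_eq_getElem?_getD, List.getElem?_set, if_neg hnn]
  · subst h
    by_cases hlen : r.toNat < box.length
    · rw [List.getD_eq_getElem?_getD, List.getD_eq_getElem?_getD, List.getElem?_set,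
          if_pos rfl, if_pos hlen, List.getElem?_eq_getElem hlen]
      simp only [Option.getD_some]
      rw [PySem.List.pyGetD_of_nonneg _ _ hr, PySem.List.pySetD_of_nonneg _ _ hc,
          PySem.List.pyGetD_of_nonneg _ _ hc', PySem.List.pyGetD_of_nonneg _ _ hc']
      have hgd : box.getD r.toNat [] = box[r.toNat] := by
        rw [List.getD_eq_getElem?_getD, List.getElem?_eq_getElem hlen]; rfl
      rw [hgd]
      rw [List.getD_eq_getElem?_getD, List.getD_eq_getElem?_getD, List.getElem?_set,
          if_neg (by omega)]
    · rw [List.set_eq_of_length_le (by omega)]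

-- the generic in-place shift walk: fold of stepA over a duplicate-free nonneg coordinate list
lemma shift_spec (cs : List (Int × Int)) : ∀ (box : List (List Int)) (last mn : Int),
    cs.Nodup → (∀ p ∈ cs, 0 ≤ p.1 ∧ 0 ≤ p.2) →
    cs.foldl (fun t p => stepA t p.1 p.2) (box, last, mn)
      = (writeBack box (cs.zip (last :: cs.map (fun p => getCell box p.1 p.2))),
         (cs.map (fun p => getCell box p.1 p.2)).getLastD last,
         (cs.zip (last :: cs.map (fun p => getCell box p.1 p.2))).foldl
           (fun m pv => if pv.2 < m then pv.2 else m) mn) := by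
  induction cs with
  | nil => intro box last mn _ _; simp [writeBack]
  | cons p cs ih =>
    intro box last mn hnd hnn
    obtain ⟨hp, hcs⟩ := List.nodup_cons.mp hnd
    have hpn := hnn p (List.mem_cons_self ..)
    have hmap : cs.map (fun q => getCell (setCell box p.1 p.2 last) q.1 q.2)
        = cs.map (fun q => getCell box q.1 q.2) := by
      apply List.map_congr_left
      intro q hq
      have hqn := hnn q (List.mem_cons_of_mem _ hq)
      refine getCell_setCell_ne box last hpn.1 hpn.2 hqn.1 hqn.2 ?_
      intro hpq
      exact hp (by
        have : p = q := by
          cases p; cases q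
          simpa using hpq
        rw [this]; exact hq)
    simp only [List.foldl_cons]
    have hstep : stepA (box, last, mn) p.1 p.2
        = (setCell box p.1 p.2 last, getCell box p.1 p.2, if last < mn then last else mn) := rfl
    rw [hstep, ih _ _ _ hcs (fun q hq => hnn q (List.mem_cons_of_mem _ hq)), hmap]
    simp only [List.map_cons, List.zip_cons_cons, List.getLastD_cons, List.foldl_cons]
    rfl

lemma coords_nonneg {x1 y1 x2 y2 : Int} (hx1 : 0 ≤ x1) (hx : x1 < x2) (hy1 : 0 ≤ y1) (hy : y1 < y2) :
    ∀ p ∈ borderCoords x1 y1 x2 y2, 0 ≤ p.1 ∧ 0 ≤ p.2 := by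
  intro p hp
  unfold borderCoords at hp
  rw [List.mem_append] at hp
  rcases hp with hp | h4
  · rw [List.mem_append] at hp
    rcases hp with hp | h3
    · rw [List.mem_append] at hp
      rcases hp with h1 | h2
      · obtain ⟨k, hk, rfl⟩ := List.mem_map.mp h1
        rw [PySem.List.mem_pyRange_one] at hk
        exact ⟨hx1, by omega⟩
      · obtain ⟨k, hk, rfl⟩ := List.mem_map.mp h2
        rw [PySem.List.mem_pyRange_one] at hk
        constructor <;> omega
    · obtain ⟨k, hk, rfl⟩ := List.mem_map.mp h3
      rw [PySem.List.mem_pyRange_neg_one] at hk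
      constructor <;> omega
  · obtain ⟨k, hk, rfl⟩ := List.mem_map.mp h4
    rw [PySem.List.mem_pyRange_neg_one] at hk
    constructor <;> omega

lemma nodup_pyRange_neg_one (a b : Int) : (PySem.List.pyRange a b (-1)).Nodup := by
  rw [PySem.List.pyRange_neg_one_eq_reverse]
  exact List.nodup_reverse.mpr (PySem.List.nodup_pyRange_one _ _)

lemma coords_nodup {x1 y1 x2 y2 : Int} (hx : x1 < x2) (hy : y1 < y2) :
    (borderCoords x1 y1 x2 y2).Nodup := by
  have injL : ∀ x : Int, Function.Injective (fun c : Int => (x, c)) := by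
    intro x a b h; simpa using congrArg Prod.snd h
  have injR : ∀ y : Int, Function.Injective (fun r : Int => (r, y)) := by
    intro y a b h; simpa using congrArg Prod.fst h
  unfold borderCoords
  rw [List.nodup_append, List.nodup_append, List.nodup_append]
  refine ⟨⟨⟨(PySem.List.nodup_pyRange_one _ _).map (injL _),
            (PySem.List.nodup_pyRange_one _ _).map (injR _), ?_⟩,
           (nodup_pyRange_neg_one _ _).map (injL _), ?_⟩,
          (nodup_pyRange_neg_one _ _).map (injR _), ?_⟩
  · intro p hp q hq
    obtain ⟨k1, hk1, rfl⟩ := List.mem_map.mp hp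
    obtain ⟨k2, hk2, rfl⟩ := List.mem_map.mp hq
    rw [PySem.List.mem_pyRange_one] at hk1 hk2
    intro h
    have h1 := congrArg Prod.fst h
    simp at h1; omega
  · intro p hp q hq
    obtain ⟨k2, hk2, rfl⟩ := List.mem_map.mp hq
    rw [PySem.List.mem_pyRange_neg_one] at hk2
    rw [List.mem_append] at hp
    rcases hp with h1 | h2
    · obtain ⟨k1, hk1, rfl⟩ := List.mem_map.mp h1
      rw [PySem.List.mem_pyRange_one] at hk1
      intro h
      have hfst := congrArg Prod.fst h
      simp at hfst; omega
    · obtain ⟨k1, hk1, rfl⟩ := List.mem_map.mp h2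
      rw [PySem.List.mem_pyRange_one] at hk1
      intro h
      have hsnd := congrArg Prod.snd h
      simp at hsnd; omega
  · intro p hp q hq
    obtain ⟨k2, hk2, rfl⟩ := List.mem_map.mp hq
    rw [PySem.List.mem_pyRange_neg_one] at hk2
    rw [List.mem_append] at hp
    rcases hp with hp | h3
    · rw [List.mem_append] at hp
      rcases hp with h1 | h2
      · obtain ⟨k1, hk1, rfl⟩ := List.mem_map.mp h1
        rw [PySem.List.mem_pyRange_one] at hk1
        intro h
        have hfst := congrArg Prod.fst h
        simp at hfst; omega
      · obtain ⟨k1, hk1, rfl⟩ := List.mem_map.mp h2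
        rw [PySem.List.mem_pyRange_one] at hk1
        intro h
        have hsnd := congrArg Prod.snd h
        simp at hsnd; omega
    · obtain ⟨k1, hk1, rfl⟩ := List.mem_map.mp h3
      rw [PySem.List.mem_pyRange_neg_one] at hk1
      intro h
      have hfst := congrArg Prod.fst h
      simp at hfst; omega

lemma coords_getLast? {x1 y1 x2 y2 : Int} (hx : x1 < x2) (hy : y1 < y2) :
    (borderCoords x1 y1 x2 y2).getLast? = some (x1 + 1, y1) := by
  unfold borderCoords
  rw [List.getLast?_append, List.getLast?_append, List.getLast?_append]
  by_cases hx2 : x1 + 1 < x2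
  · have h4 : PySem.List.pyRange (x2 - 1) x1 (-1) = (PySem.List.pyRange (x1 + 1) x2 1).reverse := by
      rw [PySem.List.pyRange_neg_one_eq_reverse, show x2 - 1 + 1 = x2 from by ring]
    rw [h4, List.map_reverse, List.getLast?_reverse, PySem.List.pyRange_one_cons hx2]
    simp
  · have hx2e : x2 = x1 + 1 := by omega
    have h4 : PySem.List.pyRange (x2 - 1) x1 (-1) = ([] : List Int) :=
      PySem.List.pyRange_neg_one_eq_nil (by omega)
    have h3 : PySem.List.pyRange (y2 - 1) (y1 - 1) (-1) = (PySem.List.pyRange y1 y2 1).reverse := by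
      rw [PySem.List.pyRange_neg_one_eq_reverse, show y1 - 1 + 1 = y1 from by ring,
          show y2 - 1 + 1 = y2 from by ring]
    rw [h4, h3, List.map_reverse, List.getLast?_reverse, PySem.List.pyRange_one_cons hy]
    simp [hx2e]

-- zip ignores the tail of the longer right list
lemma zip_append_right {α β : Type} : ∀ (l1 : List α) (l2 l3 : List β), l1.length ≤ l2.length →
    l1.zip (l2 ++ l3) = l1.zip l2 := by
  intro l1
  induction l1 with
  | nil => intro l2 l3 _; simp
  | cons a l ih =>
    intro l2 l3 h
    cases l2 with
    | nil => simp at h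
    | cons b l2' => simp [ih l2' l3 (by simpa using h)]

lemma map_snd_zip_len {α β : Type} : ∀ (l1 : List α) (l2 : List β), l1.length = l2.length →
    (l1.zip l2).map Prod.snd = l2 := by
  intro l1
  induction l1 with
  | nil =>
    intro l2 h
    cases l2 with
    | nil => rfl
    | cons b t => simp at h
  | cons a l ih =>
    intro l2 h
    cases l2 with
    | nil => simp at h
    | cons b t => simp [ih t (by simpa using h)]

lemma foldl_min_comm : ∀ (l : List Int) (a x : Int),
    List.foldl min (min a x) l = min (List.foldl min a l) x := by
  intro l
  induction l with
  | nil => intro a x; rfl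
  | cons b t ih =>
    intro a x
    simp only [List.foldl_cons]
    rw [min_right_comm a x b, ih]

-- A's running `if lastValue < minNum` update is a fold of `min` over the swapped-out values
lemma foldl_min_zip : ∀ (zs : List ((Int × Int) × Int)) (mn : Int),
    zs.foldl (fun m pv => if pv.2 < m then pv.2 else m) mn = List.foldl min mn (zs.map Prod.snd) := by
  intro zs
  induction zs with
  | nil => intro mn; rfl
  | cons z t ih =>
    intro mn
    simp only [List.foldl_cons, List.map_cons]
    rw [ih]
    congr 1
    by_cases h : z.2 < mn
    · rw [if_pos h, min_def, if_neg (by omega)]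
    · rw [if_neg h, min_def, if_pos (by omega)]

-- A's four shift loops over one border, characterised in B's vocabulary
lemma shiftA_eq (box : List (List Int)) (x1 y1 x2 y2 : Int)
    (hx1 : 0 ≤ x1) (hx : x1 < x2) (hy1 : 0 ≤ y1) (hy : y1 < y2) :
    (PySem.List.pyRange (x2 - 1) x1 (-1)).foldl (fun t k => stepA t k y1)
      ((PySem.List.pyRange (y2 - 1) (y1 - 1) (-1)).foldl (fun t k => stepA t x2 k)
        ((PySem.List.pyRange (x1 + 1) (x2 + 1) 1).foldl (fun t k => stepA t k y2)
          ((PySem.List.pyRange y1 (y2 + 1) 1).foldl (fun t k => stepA t x1 k)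
            (box, getCell box (x1 + 1) y1, 2147000))))
    = (writeBack box ((borderCoords x1 y1 x2 y2).zip
         (PySem.List.slice ((borderCoords x1 y1 x2 y2).map (fun p => getCell box p.1 p.2)) (some (-1)) none
          ++ PySem.List.slice ((borderCoords x1 y1 x2 y2).map (fun p => getCell box p.1 p.2)) none (some (-1)))),
       ((borderCoords x1 y1 x2 y2).map (fun p => getCell box p.1 p.2)).getLastD (getCell box (x1 + 1) y1),
       (PySem.List.min? ((2147000 : Int) :: (borderCoords x1 y1 x2 y2).map (fun p => getCell box p.1 p.2)) (fun y => y)).getD 0) := by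
  have hA : (PySem.List.pyRange (x2 - 1) x1 (-1)).foldl (fun t k => stepA t k y1)
      ((PySem.List.pyRange (y2 - 1) (y1 - 1) (-1)).foldl (fun t k => stepA t x2 k)
        ((PySem.List.pyRange (x1 + 1) (x2 + 1) 1).foldl (fun t k => stepA t k y2)
          ((PySem.List.pyRange y1 (y2 + 1) 1).foldl (fun t k => stepA t x1 k)
            (box, getCell box (x1 + 1) y1, 2147000))))
      = (borderCoords x1 y1 x2 y2).foldl (fun t p => stepA t p.1 p.2)
          (box, getCell box (x1 + 1) y1, 2147000) := by
    simp only [borderCoords, List.foldl_append, List.foldl_map]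
  rw [hA, shift_spec _ _ _ _ (coords_nodup hx hy) (coords_nonneg hx1 hx hy1 hy)]
  set coords := borderCoords x1 y1 x2 y2 with hcoords
  set vals := coords.map (fun p => getCell box p.1 p.2) with hvals
  set last := getCell box (x1 + 1) y1 with hlastdef
  have hvalsL : vals.getLast? = some last := by
    rw [hvals, List.getLast?_map, coords_getLast? hx hy]; rfl
  have hne : vals ≠ [] := by
    intro h; rw [h] at hvalsL; simp at hvalsL
  have hvpos : vals.length ≠ 0 := fun h0 => hne (List.eq_nil_of_length_eq_zero h0)
  have hlast_eq : vals.getLast hne = last := by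
    rw [List.getLast?_eq_getLast hne] at hvalsL
    exact Option.some.inj hvalsL
  have hsplit : vals.dropLast ++ [last] = vals := by
    rw [← hlast_eq]; exact List.dropLast_append_getLast hne
  have hlenc : coords.length = vals.length := by simp [hvals]
  have hrot : PySem.List.slice vals (some (-1)) none ++ PySem.List.slice vals none (some (-1))
      = last :: vals.dropLast := by
    rw [PySem.List.slice_from_neg_one, PySem.List.slice_to_neg_one]
    conv_lhs => rw [← hsplit]
    rw [show (vals.dropLast ++ [last]).length - 1 = vals.dropLast.length by simp,
        List.drop_left, List.dropLast_concat]
    rfl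
  have hlen2 : coords.length ≤ (last :: vals.dropLast).length := by
    simp only [List.length_cons, List.length_dropLast]
    rw [hlenc]
    omega
  have hzip : coords.zip (last :: vals) = coords.zip (last :: vals.dropLast) := by
    conv_lhs => rw [show last :: vals = (last :: vals.dropLast) ++ [last] by
      rw [List.cons_append, hsplit]]
    exact zip_append_right _ _ _ hlen2
  refine Prod.ext ?_ (Prod.ext ?_ ?_)
  · rw [hrot, hzip]
  · rfl
  · show (coords.zip (last :: vals)).foldl (fun m pv => if pv.2 < m then pv.2 else m) 2147000
      = (PySem.List.min? ((2147000 : Int) :: vals) (fun y => y)).getD 0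
    rw [PySem.List.min?_id_cons, Option.getD_some, hzip, foldl_min_zip,
        map_snd_zip_len _ _ (by
          simp only [List.length_cons, List.length_dropLast]
          rw [hlenc]
          omega)]
    conv_rhs => rw [← hsplit]
    simp only [List.foldl_cons, List.foldl_append, List.foldl_nil]
    exact foldl_min_comm _ _ _

-- one query processed identically by both sides
lemma queryStep_eq (rows columns : Int) (box : List (List Int)) (ans : List Int) (q : List Int)
    (hq : preQ rows columns q = true) :
    queryStepA (box, ans) q = queryStepB (box, ans) q := by
  rcases q with _ | ⟨a, _ | ⟨b, _ | ⟨c, _ | ⟨d, rest⟩⟩⟩⟩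
  · simp [preQ] at hq
  · simp [preQ] at hq
  · simp [preQ] at hq
  · simp [preQ] at hq
  · unfold preQ at hq
    obtain ⟨h1, h2, h3, h4, h5, h6⟩ := of_decide_eq_true hq
    unfold queryStepA queryStepB
    dsimp only
    have e0 : PySem.List.pyGetD (a :: b :: c :: d :: rest) 0 0 = a := by
      rw [show (0 : Int) = ((0 : Nat) : Int) from rfl, PySem.List.pyGetD_natCast]; rfl
    have e1 : PySem.List.pyGetD (a :: b :: c :: d :: rest) 1 0 = b := by
      rw [show (1 : Int) = ((1 : Nat) : Int) from rfl, PySem.List.pyGetD_natCast]; rfl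
    have e2 : PySem.List.pyGetD (a :: b :: c :: d :: rest) 2 0 = c := by
      rw [show (2 : Int) = ((2 : Nat) : Int) from rfl, PySem.List.pyGetD_natCast]; rfl
    have e3 : PySem.List.pyGetD (a :: b :: c :: d :: rest) 3 0 = d := by
      rw [show (3 : Int) = ((3 : Nat) : Int) from rfl, PySem.List.pyGetD_natCast]; rfl
    simp only [e0, e1, e2, e3]
    rw [shiftA_eq box (a - 1) (b - 1) (c - 1) (d - 1) (by omega) (by omega) (by omega) (by omega)]

lemma fold_eq (rows columns : Int) (qs : List (List Int)) : ∀ (box : List (List Int)) (ans : List Int),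
    qs.all (preQ rows columns) = true →
    qs.foldl queryStepA (box, ans) = qs.foldl queryStepB (box, ans) := by
  induction qs with
  | nil => intro box ans _; rfl
  | cons q qs ih =>
    intro box ans hall
    rw [List.all_cons, Bool.and_eq_true] at hall
    simp only [List.foldl_cons]
    rw [queryStep_eq rows columns box ans q hall.1]
    cases hqb : queryStepB (box, ans) q with
    | mk b' a' => exact ih b' a' hall.2

-- row-level numbering step (proof-only helper)
def innerStepRow (t : List Int × Int) (j : Int) : List Int × Int :=
  (PySem.List.pySetD t.1 j (t.2 + 1), t.2 + 1)

lemma inner_factor (js : List Int) : ∀ (box : List (List Int)) (i num : Int),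
    0 ≤ i → i.toNat < box.length →
    js.foldl (fun (t : List (List Int) × Int) j => (setCell t.1 i j (t.2 + 1), t.2 + 1)) (box, num)
    = (PySem.List.pySetD box i (js.foldl innerStepRow (PySem.List.pyGetD box i [], num)).1,
       num + js.length) := by
  induction js with
  | nil =>
    intro box i num h0 hlen
    simp only [List.foldl_nil]
    rw [PySem.List.pySetD_of_nonneg _ _ h0, PySem.List.pyGetD_of_nonneg _ _ h0]
    have hbox : box.set i.toNat (box.getD i.toNat []) = box := by
      rw [List.getD_eq_getElem?_getD, List.getElem?_eq_getElem hlen, Option.getD_some,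
          List.set_getElem_self]
    rw [hbox]
    simp
  | cons j js ih =>
    intro box i num h0 hlen
    simp only [List.foldl_cons]
    have hlen1 : i.toNat < (setCell box i j (num + 1)).length := by
      simpa [setCell, PySem.List.length_pySetD] using hlen
    rw [ih (setCell box i j (num + 1)) i (num + 1) h0 hlen1]
    have hrow : PySem.List.pyGetD (setCell box i j (num + 1)) i []
        = PySem.List.pySetD (PySem.List.pyGetD box i []) j (num + 1) := by
      unfold setCell
      rw [PySem.List.pySetD_of_nonneg _ _ h0, PySem.List.pyGetD_of_nonneg _ _ h0,
          List.getD_eq_getElem?_getD, List.getElem?_set_self hlen, Option.getD_some]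
    have hset2 : ∀ X : List Int, PySem.List.pySetD (setCell box i j (num + 1)) i X
        = PySem.List.pySetD box i X := by
      intro X
      unfold setCell
      rw [PySem.List.pySetD_of_nonneg _ _ h0, PySem.List.pySetD_of_nonneg _ _ h0,
          PySem.List.pySetD_of_nonneg _ _ h0, List.set_set]
    rw [hrow, hset2]
    refine Prod.ext (by simp [innerStepRow]) ?_
    simp only [List.length_cons]
    push_cast
    ring

lemma fillN : ∀ (n : Nat) (row : List Int) (num : Int), n ≤ row.length →
    ((List.range n).map (fun k : Nat => (k : Int))).foldl innerStepRow (row, num)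
    = ((List.range n).map (fun k : Nat => num + (k : Int) + 1) ++ row.drop n, num + n) := by
  intro n
  induction n with
  | zero => intro row num _; simp
  | succ n ih =>
    intro row num h
    have hlt : n < row.length := by omega
    rw [List.range_succ, List.map_append, List.foldl_append, ih row num (by omega)]
    simp only [List.map_cons, List.map_nil, List.foldl_cons, List.foldl_nil, innerStepRow]
    refine Prod.ext ?_ ?_
    · dsimp only
      rw [PySem.List.pySetD_of_nonneg _ _ (Int.natCast_nonneg n)]
      simp only [Int.toNat_natCast]
      rw [List.set_append_right _ _ (by simp)]
      simp only [List.length_map, List.length_range, Nat.sub_self]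
      rw [List.drop_eq_getElem_cons hlt, List.set_cons_zero]
      rw [List.map_append, List.append_assoc]
      rfl
    · dsimp only
      push_cast
      ring

lemma outer_fill (columns : Int) (m : Nat) (hmc : ((m : Nat) : Int) = columns) (R : Nat) :
    ∀ (n : Nat), n ≤ R →
    (List.range n).foldl (fun (s : List (List Int) × Int) (k : Nat) =>
        ((List.range m).map (fun j : Nat => (j : Int))).foldl (fun (t : List (List Int) × Int) j =>
          (setCell t.1 (k : Int) j (t.2 + 1), t.2 + 1)) s)
      ((List.range R).map (fun _ => (List.range m).map (fun _ => (0 : Int))), 0)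
    = ((List.range R).map (fun r =>
        if r < n then (List.range m).map (fun c : Nat => (r : Int) * columns + (c : Int) + 1)
        else (List.range m).map (fun _ => (0 : Int))), (n : Int) * columns) := by
  intro n
  induction n with
  | zero => intro _; simp
  | succ n ih =>
    intro hn
    have hnR : n < R := by omega
    rw [List.range_succ, List.foldl_append, ih (by omega), List.foldl_cons, List.foldl_nil]
    have hilen : ((n : Int)).toNat < ((List.range R).map (fun r =>
        if r < n then (List.range m).map (fun c : Nat => (r : Int) * columns + (c : Int) + 1)
        else (List.range m).map (fun _ => (0 : Int)))).length := by
      simp only [Int.toNat_natCast, List.length_map, List.length_range]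
      omega
    rw [inner_factor _ _ _ _ (Int.natCast_nonneg n) hilen]
    have hrowz : PySem.List.pyGetD ((List.range R).map (fun r =>
        if r < n then (List.range m).map (fun c : Nat => (r : Int) * columns + (c : Int) + 1)
        else (List.range m).map (fun _ => (0 : Int)))) (↑n) []
        = (List.range m).map (fun _ => (0 : Int)) := by
      rw [PySem.List.pyGetD_of_nonneg _ _ (Int.natCast_nonneg n)]
      simp [Int.toNat_natCast, List.getD_eq_getElem?_getD, List.getElem?_map,
            List.getElem?_range, hnR]
    rw [hrowz, fillN m _ _ (by simp)]
    have hdrop : ((List.range m).map (fun _ => (0 : Int))).drop m = [] := by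
      apply List.drop_eq_nil_of_le
      simp
    rw [hdrop, List.append_nil]
    refine Prod.ext ?_ ?_
    · dsimp only
      rw [PySem.List.pySetD_of_nonneg _ _ (Int.natCast_nonneg n)]
      simp only [Int.toNat_natCast]
      apply List.ext_getElem
      · simp
      · intro k hk1 hk2
        rw [List.getElem_set]
        simp only [List.getElem_map, List.getElem_range]
        by_cases hkn : n = k
        · subst hkn
          rw [if_pos rfl, if_pos (by omega)]
        · rw [if_neg hkn]
          by_cases hklt : k < n
          · rw [if_pos hklt, if_pos (by omega)]
          · rw [if_neg hklt, if_neg (by omega)]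
    · dsimp only
      simp only [List.length_map, List.length_range]
      rw [hmc]
      push_cast
      ring

lemma foldl_const {α β : Type} : ∀ (l : List α) (s : β), l.foldl (fun s _ => s) s = s := by
  intro l
  induction l with
  | nil => intro s; rfl
  | cons a t ih => intro s; exact ih s

lemma numbered_eq (rows columns : Int) :
    ((PySem.List.pyRange 0 rows 1).foldl (fun (s : List (List Int) × Int) i =>
      (PySem.List.pyRange 0 columns 1).foldl (fun (t : List (List Int) × Int) j =>
        (setCell t.1 i j (t.2 + 1), t.2 + 1)) s)
      ((PySem.List.pyRange 0 rows 1).map (fun _ => (PySem.List.pyRange 0 columns 1).map (fun _ => (0 : Int))), 0)).1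
    = (PySem.List.pyRange 0 rows 1).map (fun r => (PySem.List.pyRange 0 columns 1).map (fun c => r * columns + c + 1)) := by
  by_cases hc : 0 < columns
  · have hprR : PySem.List.pyRange 0 rows 1 = (List.range rows.toNat).map (fun k : Nat => (k : Int)) := by
      rw [PySem.List.pyRange_one]
      simp only [sub_zero, zero_add]
    have hprC : PySem.List.pyRange 0 columns 1 = (List.range columns.toNat).map (fun k : Nat => (k : Int)) := by
      rw [PySem.List.pyRange_one]
      simp only [sub_zero, zero_add]
    rw [hprR, hprC, List.foldl_map]
    simp only [List.map_map, Function.comp_def]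
    rw [outer_fill columns columns.toNat (Int.toNat_of_nonneg hc.le) rows.toNat rows.toNat (le_refl _)]
    dsimp only
    apply List.map_congr_left
    intro r hr
    rw [if_pos (List.mem_range.mp hr)]
  · have h0 : PySem.List.pyRange 0 columns 1 = ([] : List Int) :=
      PySem.List.pyRange_one_eq_nil (by omega)
    rw [h0]
    simp only [List.map_nil, List.foldl_nil]
    rw [foldl_const]

-- ===== VERDICT (by name: the statement is the Claim_ definition above) =====
theorem solution_spec : Claim_equal_solution := by
  intro rows columns queries _ hpre
  unfold Spec_solution solution solution_alt
  dsimp only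
  rw [numbered_eq rows columns]
  rw [fold_eq rows columns queries _ _ hpre]
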